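-- pv_equiv track=rewrite | github.com/BroBezzubik/Analysis_Algorithm | lab_03/smooth_sort.py | heapDivision
-- ===== SOURCE A (Python) =====
-- def countIndexes(i, indexes):
--     indexes.append(2*indexes[i]+1)
--     indexes.append(2*indexes[i]+2)
--
--     return indexes
--
-- def getList(indexPart, heap):
--     heapPart = []
--     for i in indexPart:
--         if i < len(heap):
--             heapPart.append(heap[i])
--
--     return heapPart
--
-- def heapDivision(heap):
--     heapleft = []
--     heapright = []
--     index = 0
--     indexesLeft = [1] # список индексов для элементов левой подкучи
--     indexesRight = [2] # список индексов для элементов правой подкучи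
--     while indexesLeft[-1] < len(heap):
--         # исходя из логики построения куч, левая подкуча никогда не будет меньше правой
--
--         # считаем индексы для левой подкучи
--         indexesLeft = countIndexes(index, indexesLeft)
--
--         # считаем индексы для правой подкучи
--         indexesRight = countIndexes(index, indexesRight)
--
--         index += 1
--
--     # составляем списки левой и правой подкуч
--     heapleft = getList(indexesLeft, heap)
--     heapright = getList(indexesRight, heap)
--
--     return heapleft, heapright
-- ===== SOURCE B (Python) =====
-- def _side(j):
--     # climb parents until reaching a root child (1 = left, 2 = right)
--     while j > 2:
--         j = (j - 1) // 2
--     return j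
--
-- def heapDivision(heap):
--     heapleft = []
--     heapright = []
--     for i in range(1, len(heap)):
--         if _side(i) == 1:
--             heapleft.append(heap[i])
--         else:
--             heapright.append(heap[i])
--     return heapleft, heapright
-- ===== Notes on version B (the rewrite author's own statement) =====
-- stated objective: simpler
-- what changed: Instead of growing BFS index tables for both subtrees in a while loop and then filtering them against the heap length, B classifies each index 1..len-1 in one pass by climbing parents ((j-1)//2) until it reaches root child 1 or 2.
import Mathlib
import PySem

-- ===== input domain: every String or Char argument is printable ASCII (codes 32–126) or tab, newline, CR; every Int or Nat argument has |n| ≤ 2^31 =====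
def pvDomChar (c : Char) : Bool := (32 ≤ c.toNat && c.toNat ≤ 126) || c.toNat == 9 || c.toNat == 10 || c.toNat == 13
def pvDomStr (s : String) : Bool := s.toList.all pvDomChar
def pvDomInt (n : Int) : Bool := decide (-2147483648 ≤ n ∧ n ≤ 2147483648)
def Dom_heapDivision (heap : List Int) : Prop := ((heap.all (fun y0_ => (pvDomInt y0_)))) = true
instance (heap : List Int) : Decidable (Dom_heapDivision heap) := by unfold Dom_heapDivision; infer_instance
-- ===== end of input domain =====

-- B classifies each index by climbing to the root's child instead of generating BFS index tables; simpler, same return value.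

-- ===== PORT A =====
-- Python mutates `indexes` in place and returns it; the pure version returns the extended list.
-- `indexes[i]` is read twice (the second read after the first append); i is in range at every
-- reachable call (proved below via the loop invariant), where Python would raise we use default 0.
def countIndexes (i : Int) (indexes : List Int) : List Int :=
  let xs1 := indexes ++ [2 * PySem.List.pyGetD indexes i 0 + 1]
  xs1 ++ [2 * PySem.List.pyGetD xs1 i 0 + 2]

def getList (indexPart : List Int) (heap : List Int) : List Int :=
  indexPart.foldl
    (fun heapPart i =>
      if i < (heap.length : Int) then heapPart ++ [PySem.List.pyGetD heap i 0] else heapPart) []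

-- the while loop; fuel `heap.length + 1` is sufficient (each iteration pushes the sentinel
-- `indexesLeft[-1]` up by at least 2, see `heapLoop_reaches` below), so the fuel guard only makes
-- the recursion total and is never hit.
def heapLoop (n : Int) : Nat → List Int → List Int → Int → List Int × List Int
  | 0, indexesLeft, indexesRight, _ => (indexesLeft, indexesRight)
  | fuel + 1, indexesLeft, indexesRight, index =>
    if PySem.List.pyGetD indexesLeft (-1) 0 < n then
      heapLoop n fuel (countIndexes index indexesLeft) (countIndexes index indexesRight) (index + 1)
    else (indexesLeft, indexesRight)

def heapDivision (heap : List Int) : List Int × List Int :=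
  let p := heapLoop (heap.length : Int) (heap.length + 1) [1] [2] 0
  (getList p.1 heap, getList p.2 heap)

-- ===== PORT B =====
-- climb parents until reaching a root child (1 = left, 2 = right)
def sideI (j : Int) : Int :=
  if 2 < j then sideI (PySem.Int.floordiv (j - 1) 2) else j
termination_by j.toNat
decreasing_by
  rw [PySem.Int.floordiv_eq_ediv_of_pos (by omega)]
  omega

def heapDivision_alt (heap : List Int) : List Int × List Int :=
  (PySem.List.pyRange 1 (heap.length : Int) 1).foldl
    (fun acc i =>
      if sideI i = 1 then (acc.1 ++ [PySem.List.pyGetD heap i 0], acc.2)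
      else (acc.1, acc.2 ++ [PySem.List.pyGetD heap i 0]))
    ([], [])

-- ===== PRECONDITION & SPEC =====
def Spec_heapDivision (heap : List Int) (out : List Int × List Int) : Prop := out = heapDivision_alt heap
instance (heap : List Int) (out : List Int × List Int) : Decidable (Spec_heapDivision heap out) := by unfold Spec_heapDivision; infer_instance

-- ===== CLAIM (what is proved, stated in full; the proofs are below) =====
def Claim_equal_heapDivision : Prop := ∀ (heap : List Int), Dom_heapDivision heap → Spec_heapDivision heap (heapDivision heap)

-- ===== LEMMAS AND PROOFS =====

-- Nat-level mirror of B's climb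
def sideN (j : Nat) : Nat :=
  if 2 < j then sideN ((j - 1) / 2) else j
termination_by j
decreasing_by omega

-- `node b k` = the k-th node (in level order) of the infinite binary subtree rooted at b,
-- under the array-heap child rule c ↦ 2c+1, 2c+2.
def node (b : Nat) : Nat → Nat
  | 0 => b
  | k + 1 => 2 * node b (k / 2) + (if k % 2 = 0 then 1 else 2)
decreasing_by omega

theorem node_odd (b i : Nat) : node b (2 * i + 1) = 2 * node b i + 1 := by
  show node b ((2 * i) + 1) = _
  rw [node]
  simp [Nat.mul_mod_right]

theorem node_even (b i : Nat) : node b (2 * i + 2) = 2 * node b i + 2 := by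
  show node b ((2 * i + 1) + 1) = _
  rw [node]
  have h1 : (2 * i + 1) / 2 = i := by omega
  have h2 : (2 * i + 1) % 2 = 1 := by omega
  simp [h1, h2]

theorem node_ge (b : Nat) (hb : 1 ≤ b) : ∀ k, k + b ≤ node b k := by
  intro k
  induction k using Nat.strong_induction_on with
  | _ k ih =>
    match k with
    | 0 => simp [node]
    | Nat.succ k =>
      rw [node]
      have := ih (k / 2) (by omega)
      split <;> omega

theorem node_lt_succ (b : Nat) : ∀ k, node b k < node b (k + 1) := by
  intro k
  induction k using Nat.strong_induction_on with
  | _ k ih =>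
    rcases Nat.even_or_odd k with ⟨i, hi⟩ | ⟨i, hi⟩
    · have hk : k = 2 * i := by omega
      subst hk
      match i with
      | 0 => simp [node]; omega
      | Nat.succ i =>
        -- k = 2i+2, successor 2i+3 = 2(i+1)+1
        have h1 : 2 * (i + 1) = 2 * i + 2 := by ring
        have h3 : node b (2 * (i + 1) + 1) = 2 * node b (i + 1) + 1 := node_odd b (i + 1)
        have h4 : node b (2 * i + 2) = 2 * node b i + 2 := node_even b i
        have h5 : node b i < node b (i + 1) := ih i (by omega)
        rw [h1, h4, show 2 * i + 2 + 1 = 2 * (i + 1) + 1 by ring, h3]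
        omega
    · have hk : k = 2 * i + 1 := by omega
      subst hk
      have h2 : node b (2 * i + 1) = 2 * node b i + 1 := node_odd b i
      have h3 : node b (2 * i + 1 + 1) = 2 * node b i + 2 := node_even b i
      omega

theorem node_strictMono (b : Nat) : StrictMono (node b) :=
  strictMono_nat_of_lt_succ (node_lt_succ b)

theorem node_le_node (k : Nat) : node 1 k ≤ node 2 k := by
  induction k using Nat.strong_induction_on with
  | _ k ih =>
    match k with
    | 0 => simp [node]
    | Nat.succ k =>
      rw [node, node]
      have := ih (k / 2) (by omega)
      omega

theorem sideN_node (b : Nat) (hb : 1 ≤ b) (hb2 : b ≤ 2) : ∀ k, sideN (node b k) = b := by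
  intro k
  induction k using Nat.strong_induction_on with
  | _ k ih =>
    match k with
    | 0 => rw [node, sideN]; simp [show ¬ 2 < b by omega]
    | Nat.succ k =>
      rw [node, sideN]
      have hge := node_ge b (by omega) (k / 2)
      have hrec := ih (k / 2) (by omega)
      have hlt : 2 < 2 * node b (k / 2) + (if k % 2 = 0 then 1 else 2) := by
        split <;> omega
      rw [if_pos hlt]
      have harg : (2 * node b (k / 2) + (if k % 2 = 0 then 1 else 2) - 1) / 2 = node b (k / 2) := by
        split <;> omega
      rw [harg, hrec]

theorem sideN_mem (j : Nat) (hj : 1 ≤ j) : sideN j = 1 ∨ sideN j = 2 := by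
  induction j using Nat.strong_induction_on with
  | _ j ih =>
    rw [sideN]
    by_cases h : 2 < j
    · rw [if_pos h]; exact ih ((j - 1) / 2) (by omega) (by omega)
    · rw [if_neg h]; omega

theorem sideN_surj (j : Nat) (hj : 1 ≤ j) : ∃ k, node (sideN j) k = j := by
  induction j using Nat.strong_induction_on with
  | _ j ih =>
    by_cases h : 2 < j
    · have hside : sideN j = sideN ((j - 1) / 2) := by rw [sideN, if_pos h]
      obtain ⟨k, hk⟩ := ih ((j - 1) / 2) (by omega) (by omega)
      rcases Nat.even_or_odd j with ⟨i, hi⟩ | ⟨i, hi⟩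
      · refine ⟨2 * k + 2, ?_⟩
        rw [hside, node_even, hk]; omega
      · refine ⟨2 * k + 1, ?_⟩
        rw [hside, node_odd, hk]; omega
    · exact ⟨0, by rw [node, sideN, if_neg h]⟩

-- the BFS index list after t loop iterations
def Lmap (b t : Nat) : List Int := (List.range (2 * t + 1)).map (fun k => (node b k : Int))

theorem Lmap_get (b t : Nat) : PySem.List.pyGetD (Lmap b t) (t : Int) 0 = (node b t : Int) := by
  rw [PySem.List.pyGetD_natCast, Lmap]
  rw [List.getD_eq_getElem?_getD]
  simp [List.getElem?_map, List.getElem?_range (show t < 2 * t + 1 by omega)]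

theorem Lmap_succ (b t : Nat) :
    Lmap b t ++ [2 * (node b t : Int) + 1] ++ [2 * (node b t : Int) + 2] = Lmap b (t + 1) := by
  have e1 : (2 * (node b t : Int) + 1) = ((node b (2 * t + 1) : Nat) : Int) := by
    rw [node_odd]; push_cast; ring
  have e2 : (2 * (node b t : Int) + 2) = ((node b (2 * t + 2) : Nat) : Int) := by
    rw [node_even]; push_cast; ring
  rw [e1, e2, Lmap, Lmap]
  have : 2 * (t + 1) + 1 = (2 * t + 1) + 1 + 1 := by ring
  rw [this]
  simp [List.range_succ]

theorem countIndexes_Lmap (b t : Nat) :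
    countIndexes (t : Int) (Lmap b t) = Lmap b (t + 1) := by
  rw [countIndexes]
  have h1 : PySem.List.pyGetD (Lmap b t) (t : Int) 0 = (node b t : Int) := Lmap_get b t
  have h2 : PySem.List.pyGetD (Lmap b t ++ [2 * (node b t : Int) + 1]) (t : Int) 0
      = (node b t : Int) := by
    rw [PySem.List.pyGetD_natCast]
    rw [List.getD_eq_getElem?_getD, List.getElem?_append_left (by simp [Lmap]; omega)]
    rw [← List.getD_eq_getElem?_getD, ← PySem.List.pyGetD_natCast]
    exact Lmap_get b t
  simp only [h1, h2]
  exact Lmap_succ b t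

theorem Lmap_last (b t : Nat) :
    PySem.List.pyGetD (Lmap b t) (-1) 0 = (node b (2 * t) : Int) := by
  rw [PySem.List.pyGetD_neg_ofNat (Lmap b t) 1 0 (by omega) (by simp [Lmap])]
  simp [Lmap]

theorem heapLoop_reaches (n : Nat) : ∀ fuel t, n ≤ 2 * t + 1 + fuel →
    ∃ T, heapLoop (n : Int) fuel (Lmap 1 t) (Lmap 2 t) (t : Int) = (Lmap 1 T, Lmap 2 T)
      ∧ n ≤ node 1 (2 * T) := by
  intro fuel
  induction fuel with
  | zero =>
    intro t ht
    refine ⟨t, rfl, ?_⟩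
    have := node_ge 1 (by omega) (2 * t)
    omega
  | succ fuel ih =>
    intro t ht
    rw [heapLoop, Lmap_last]
    by_cases h : (node 1 (2 * t) : Int) < (n : Int)
    · rw [if_pos h, countIndexes_Lmap, countIndexes_Lmap]
      have : ((t : Int) + 1) = ((t + 1 : Nat) : Int) := by push_cast; ring
      rw [this]
      exact ih (t + 1) (by omega)
    · rw [if_neg h]
      exact ⟨t, rfl, by exact_mod_cast not_lt.mp h⟩

-- getList = filter-then-map
theorem getList_eq (l heap : List Int) :
    getList l heap
      = (l.filter (fun i => i < (heap.length : Int))).map (fun i => PySem.List.pyGetD heap i 0) := by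
  rw [getList]
  suffices h : ∀ (l acc : List Int),
      l.foldl (fun heapPart i =>
        if i < (heap.length : Int) then heapPart ++ [PySem.List.pyGetD heap i 0] else heapPart) acc
      = acc ++ (l.filter (fun i => i < (heap.length : Int))).map
          (fun i => PySem.List.pyGetD heap i 0) by
    simpa using h l []
  intro l
  induction l with
  | nil => simp
  | cons x xs ih =>
    intro acc
    simp only [List.foldl_cons, List.filter_cons]
    by_cases hx : x < (heap.length : Int)
    · simp [hx, ih]
    · simp [hx, ih]

-- two strictly increasing lists with the same members are equal
theorem eq_of_pairwise_lt_of_mem_iff : ∀ (l₁ l₂ : List Int),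
    l₁.Pairwise (· < ·) → l₂.Pairwise (· < ·) → (∀ x, x ∈ l₁ ↔ x ∈ l₂) → l₁ = l₂ := by
  intro l₁ l₂ h₁ h₂ hmem
  have n₁ : l₁.Nodup := h₁.imp ne_of_lt
  have n₂ : l₂.Nodup := h₂.imp ne_of_lt
  have hperm : l₁.Perm l₂ := (List.perm_ext_iff_of_nodup n₁ n₂).mpr hmem
  exact hperm.eq_of_pairwise (fun a b _ _ hab hba => le_antisymm hab hba) (h₁.imp le_of_lt) (h₂.imp le_of_lt)

def specList (heap : List Int) (b : Nat) : List Int :=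
  ((List.range heap.length).filter (fun j => sideN j = b)).map (fun j => heap.getD j 0)

theorem filter_Lmap (n b T : Nat) (hb1 : 1 ≤ b) (hb2 : b ≤ 2) (hT : n ≤ node 1 (2 * T)) :
    (Lmap b T).filter (fun i => i < (n : Int))
      = ((List.range n).filter (fun j => sideN j = b)).map (fun j : Nat => (j : Int)) := by
  apply eq_of_pairwise_lt_of_mem_iff
  · apply List.Pairwise.filter
    refine List.pairwise_map.mpr ?_
    refine (List.pairwise_lt_range).imp ?_
    intro a b' hab
    exact_mod_cast (node_strictMono b) hab
  · refine List.pairwise_map.mpr ?_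
    apply List.Pairwise.filter
    refine (List.pairwise_lt_range).imp ?_
    intro a b' hab; exact_mod_cast hab
  · intro x
    simp only [Lmap, List.mem_filter, List.mem_map, List.mem_range, decide_eq_true_eq]
    constructor
    · rintro ⟨⟨k, hk, rfl⟩, hlt⟩
      refine ⟨node b k, ⟨?_, ?_⟩, rfl⟩
      · exact_mod_cast hlt
      · exact sideN_node b hb1 hb2 k
    · rintro ⟨j, ⟨hjn, hjs⟩, rfl⟩
      have hj1 : 1 ≤ j := by
        by_contra h
        have hj0 : j = 0 := by omega
        subst hj0
        rw [sideN] at hjs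
        simp at hjs
        omega
      obtain ⟨k, hk⟩ := sideN_surj j hj1
      rw [hjs] at hk
      have hjlt : j < node b (2 * T) := by
        calc j < n := hjn
        _ ≤ node 1 (2 * T) := hT
        _ ≤ node b (2 * T) := by
            rcases (show b = 1 ∨ b = 2 by omega) with h | h
            · rw [h]
            · rw [h]; exact node_le_node (2 * T)
      have hkT : k < 2 * T + 1 := by
        have := (node_strictMono b).lt_iff_lt (a := k) (b := 2 * T)
        omega
      exact ⟨⟨k, hkT, by exact_mod_cast hk⟩, by exact_mod_cast hjn⟩

theorem map_cast_getD (heap : List Int) (l : List Nat) :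
    (l.map (fun j : Nat => (j : Int))).map (fun i => PySem.List.pyGetD heap i 0)
      = l.map (fun j => heap.getD j 0) := by
  rw [List.map_map]
  apply List.map_congr_left
  intro j _
  simp [PySem.List.pyGetD_natCast]

theorem A_side (heap : List Int) :
    heapDivision heap = (specList heap 1, specList heap 2) := by
  have h1 : ([1] : List Int) = Lmap 1 0 := by simp [Lmap, List.range_one, node]
  have h2 : ([2] : List Int) = Lmap 2 0 := by simp [Lmap, List.range_one, node]
  have h0 : (0 : Int) = ((0 : Nat) : Int) := rfl
  obtain ⟨T, heq, hT⟩ := heapLoop_reaches heap.length (heap.length + 1) 0 (by omega)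
  rw [heapDivision, h1, h2, h0, heq]
  simp only [getList_eq]
  rw [filter_Lmap heap.length 1 T (by omega) (by omega) hT,
      filter_Lmap heap.length 2 T (by omega) (by omega) hT,
      map_cast_getD, map_cast_getD]
  rfl

theorem sideI_cast : ∀ j : Nat, sideI (j : Int) = (sideN j : Int) := by
  intro j
  induction j using Nat.strong_induction_on with
  | _ j ih =>
    rw [sideI, sideN]
    by_cases h : 2 < j
    · rw [if_pos (by exact_mod_cast h), if_pos h]
      rw [PySem.Int.floordiv_eq_ediv_of_pos (by omega)]
      have harg : ((j : Int) - 1) / 2 = (((j - 1) / 2 : Nat) : Int) := by omega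
      rw [harg]
      exact ih ((j - 1) / 2) (by omega)
    · rw [if_neg (by exact_mod_cast h), if_neg h]

theorem foldB (heap : List Int) : ∀ (l : List Int) (accL accR : List Int),
    (l.foldl (fun acc i =>
        if sideI i = 1 then (acc.1 ++ [PySem.List.pyGetD heap i 0], acc.2)
        else (acc.1, acc.2 ++ [PySem.List.pyGetD heap i 0])) (accL, accR))
      = (accL ++ (l.filter (fun i => sideI i = 1)).map (fun i => PySem.List.pyGetD heap i 0),
         accR ++ (l.filter (fun i => ¬ (sideI i = 1))).map (fun i => PySem.List.pyGetD heap i 0)) := by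
  intro l
  induction l with
  | nil => simp
  | cons x xs ih =>
    intro accL accR
    simp only [List.foldl_cons, List.filter_cons]
    by_cases hx : sideI x = 1
    · simp [hx, ih]
    · simp [hx, ih]

theorem B_index_list (n : Nat) (b : Nat) (hb : b = 1 ∨ b = 2) :
    ((List.range (((n : Int) - 1).toNat)).map (fun k : Nat => (1 : Int) + (k : Int))).filter
        (fun i => decide (sideI i = 1) = decide (b = 1))
      = ((List.range n).filter (fun j => sideN j = b)).map (fun j : Nat => (j : Int)) := by
  apply eq_of_pairwise_lt_of_mem_iff
  · apply List.Pairwise.filter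
    refine List.pairwise_map.mpr ?_
    refine (List.pairwise_lt_range).imp ?_
    intro a b' hab
    have : (a : Int) < (b' : Int) := by exact_mod_cast hab
    omega
  · refine List.pairwise_map.mpr ?_
    apply List.Pairwise.filter
    refine (List.pairwise_lt_range).imp ?_
    intro a b' hab; exact_mod_cast hab
  · intro x
    simp only [List.mem_filter, List.mem_map, List.mem_range, decide_eq_true_eq]
    constructor
    · rintro ⟨⟨k, hk, rfl⟩, hside⟩
      have hcast : (1 : Int) + (k : Int) = ((k + 1 : Nat) : Int) := by push_cast; ring
      rw [hcast] at hside ⊢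
      rw [sideI_cast (k + 1)] at hside
      have hmem := sideN_mem (k + 1) (by omega)
      refine ⟨k + 1, ⟨by omega, ?_⟩, rfl⟩
      rcases hb with h | h <;> rcases hmem with h2 | h2 <;> simp [h, h2] at hside ⊢
    · rintro ⟨j, ⟨hjn, hjs⟩, rfl⟩
      have hj1 : 1 ≤ j := by
        by_contra h
        have hj0 : j = 0 := by omega
        subst hj0
        rw [sideN] at hjs
        simp at hjs
        omega
      refine ⟨⟨j - 1, by omega, by omega⟩, ?_⟩
      rw [sideI_cast j, hjs]
      rcases hb with h | h <;> simp [h]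

theorem B_side (heap : List Int) :
    heapDivision_alt heap = (specList heap 1, specList heap 2) := by
  rw [heapDivision_alt, PySem.List.pyRange_one, foldB]
  have hf1 : ∀ (l : List Int), l.filter (fun i => decide (sideI i = 1))
      = l.filter (fun i => decide (sideI i = 1) = decide ((1 : Nat) = 1)) := by
    intro l; apply List.filter_congr; intro x _; simp
  have hf2 : ∀ (l : List Int), l.filter (fun i => decide (¬ (sideI i = 1)))
      = l.filter (fun i => decide (sideI i = 1) = decide ((2 : Nat) = 1)) := by
    intro l; apply List.filter_congr; intro x _; simp
  rw [hf1, hf2, B_index_list heap.length 1 (Or.inl rfl), B_index_list heap.length 2 (Or.inr rfl),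
      map_cast_getD, map_cast_getD]
  rfl

-- ===== VERDICT (by name: the statement is the Claim_ definition above) =====
theorem heapDivision_spec : Claim_equal_heapDivision := by
  intro heap _
  show heapDivision heap = heapDivision_alt heap
  rw [A_side, B_side]
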